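-- pv_equiv track=rewrite | github.com/aditya-283/grammar-formalisms-project | TreebankingRecipes/KitchenStories/reorder_sentences_conllu.py | get_pos_pattern
-- ===== SOURCE A (Python) =====
-- def get_pos_pattern(tokens):
--     FOCAL_UPOS = {'ADJ', 'ADP', 'ADV', 'AUX', 'NOUN', 'PROPN', 'VERB'}
--     buff = []
--     for token in tokens:
--         if token['upos'] not in FOCAL_UPOS:
--             continue
--         if len(buff) > 0 and buff[-1] == token['upos']:
--             continue
--         buff.append(token['upos'])
--     return ' '.join(buff)
-- ===== SOURCE B (Python) =====
-- def get_pos_pattern(tokens):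
--     FOCAL_UPOS = {'ADJ', 'ADP', 'ADV', 'AUX', 'NOUN', 'PROPN', 'VERB'}
--     focal = [token['upos'] for token in tokens if token['upos'] in FOCAL_UPOS]
--
--     def run_heads(xs):
--         # split xs into maximal runs of equal tags; emit one head per run
--         if not xs:
--             return []
--         head = xs[0]
--         rest = xs[1:]
--         while rest and rest[0] == head:
--             rest = rest[1:]
--         return [head] + run_heads(rest)
--
--     return ' '.join(run_heads(focal))
-- ===== Notes on version B (the rewrite author's own statement) =====
-- stated objective: alternative
-- what changed: Instead of A's single accumulating loop that appends a tag unless it equals the buffer's last element, B first collects the focal tags and then recursively splits that list into maximal runs of equal tags (a while-loop skips the rest of each run), emitting one head per run.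
import Mathlib
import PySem

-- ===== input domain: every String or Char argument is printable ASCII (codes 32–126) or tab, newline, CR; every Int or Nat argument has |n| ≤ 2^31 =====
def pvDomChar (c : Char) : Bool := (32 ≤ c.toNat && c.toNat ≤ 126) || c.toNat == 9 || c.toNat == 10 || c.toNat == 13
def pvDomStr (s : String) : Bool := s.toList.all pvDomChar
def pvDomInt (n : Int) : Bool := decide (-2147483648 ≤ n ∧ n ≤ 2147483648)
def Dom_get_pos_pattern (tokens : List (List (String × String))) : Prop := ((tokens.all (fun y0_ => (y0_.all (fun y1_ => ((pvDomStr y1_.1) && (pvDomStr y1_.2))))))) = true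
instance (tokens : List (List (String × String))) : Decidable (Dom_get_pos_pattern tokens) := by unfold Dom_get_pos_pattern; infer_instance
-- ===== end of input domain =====

-- B differs from A in algorithmic decomposition: a filter pass, then a recursive split of the
-- focal-tag list into maximal runs of equal tags emitting one head per run, instead of A's single
-- accumulating loop comparing each tag to buff[-1]; same return value wherever A returns.

-- shared constant: the FOCAL_UPOS set literal (both Pythons define the same set)
def pvFOCAL : PySem.Set String :=
  PySem.Set.ofList ["ADJ", "ADP", "ADV", "AUX", "NOUN", "PROPN", "VERB"]

-- token['upos'] (first-match lookup); total via default "", exact under Pre_ (key present)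
def pvUpos (token : List (String × String)) : String :=
  ((PySem.Dict.mk token).get? "upos").getD ""

-- ===== PORT A =====
-- loop body of A: skip non-focal tags, skip a tag equal to buff[-1], else append
def pvStepA (buff : List String) (token : List (String × String)) : List String :=
  let u := pvUpos token
  if u ∉ pvFOCAL then buff
  else if 0 < buff.length ∧ PySem.List.pyGet? buff (-1) = some u then buff
  else buff ++ [u]

def get_pos_pattern (tokens : List (List (String × String))) : String :=
  PySem.Str.join " " (tokens.foldl pvStepA [])

-- ===== PORT B =====
-- B's comprehension filter: the tag if focal, else dropped
def pvKeep (token : List (String × String)) : Option String :=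
  let u := pvUpos token
  if u ∈ pvFOCAL then some u else none

-- B's run_heads: the while loop 'while rest and rest[0] == head: rest = rest[1:]' is dropWhile
def pvRunHeads : List String → List String
  | [] => []
  | head :: rest => head :: pvRunHeads (rest.dropWhile (· == head))
termination_by xs => xs.length
decreasing_by
  exact Nat.lt_succ_of_le (List.length_dropWhile_le _ _)

def get_pos_pattern_alt (tokens : List (List (String × String))) : String :=
  PySem.Str.join " " (pvRunHeads (tokens.filterMap pvKeep))

-- ===== PRECONDITION & SPEC =====
-- Pre_ excludes exactly the inputs where some token lacks the key 'upos': there Python A (and B) raise KeyError.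
def Pre_get_pos_pattern (tokens : List (List (String × String))) : Prop :=
  ∀ token ∈ tokens, "upos" ∈ token.map Prod.fst
instance (tokens : List (List (String × String))) : Decidable (Pre_get_pos_pattern tokens) := by unfold Pre_get_pos_pattern; infer_instance
def pvWitness_get_pos_pattern : (List (List (String × String))) :=
  [[("upos", "NOUN")], [("upos", "NOUN")], [("upos", "DET")], [("upos", "VERB")]]
def Spec_get_pos_pattern (tokens : List (List (String × String))) (out : String) : Prop := out = get_pos_pattern_alt tokens
instance (tokens : List (List (String × String))) (out : String) : Decidable (Spec_get_pos_pattern tokens out) := by unfold Spec_get_pos_pattern; infer_instance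

-- ===== CLAIM (what is proved, stated in full; the proofs are below) =====
def Claim_equal_get_pos_pattern : Prop := ∀ (tokens : List (List (String × String))), Dom_get_pos_pattern tokens → Pre_get_pos_pattern tokens → Spec_get_pos_pattern tokens (get_pos_pattern tokens)

-- ===== LEMMAS AND PROOFS =====

-- reference adjacency collapse, parameterised by the previously kept element
def pvCol (p : Option String) : List String → List String
  | [] => []
  | x :: t => if some x = p then pvCol p t else x :: pvCol (some x) t

theorem pvFold_col (ys : List (List (String × String))) : ∀ (buff : List String),
    ys.foldl pvStepA buff = buff ++ pvCol buff.getLast? (ys.filterMap pvKeep) := by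
  induction ys with
  | nil => intro buff; simp [pvCol]
  | cons tok t ih =>
    intro buff
    have hstep : pvStepA buff tok =
        (if pvUpos tok ∉ pvFOCAL then buff
         else if 0 < buff.length ∧ PySem.List.pyGet? buff (-1) = some (pvUpos tok) then buff
         else buff ++ [pvUpos tok]) := rfl
    simp only [List.foldl_cons]
    by_cases hf : pvUpos tok ∈ pvFOCAL
    · have hk : pvKeep tok = some (pvUpos tok) := by simp [pvKeep, hf]
      rw [List.filterMap_cons_some hk, hstep, if_neg (not_not_intro hf)]
      by_cases hl : buff.getLast? = some (pvUpos tok)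
      · have hne : buff ≠ [] := fun h => by simp [h] at hl
        rw [if_pos ⟨List.length_pos_iff.mpr hne,
              by rw [PySem.List.pyGet?_neg_one]; exact hl⟩, ih buff]
        simp [pvCol, hl]
      · rw [if_neg (fun hc => hl (by rw [← PySem.List.pyGet?_neg_one]; exact hc.2)),
            ih (buff ++ [pvUpos tok]), List.getLast?_concat]
        have hxp : ¬ (some (pvUpos tok) = buff.getLast?) := fun h => hl h.symm
        simp [pvCol, hxp, List.append_assoc]
    · have hk : pvKeep tok = none := by simp [pvKeep, hf]
      rw [List.filterMap_cons_none hk, hstep, if_pos hf, ih buff]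

theorem pvCol_some (t : List String) : ∀ (x : String),
    pvCol (some x) t = pvRunHeads (t.dropWhile (· == x)) := by
  induction t with
  | nil => intro x; simp [pvCol, pvRunHeads]
  | cons y t' ih =>
    intro x
    by_cases h : y = x
    · subst h
      simpa [pvCol, List.dropWhile_cons] using ih y
    · have hne : ¬ (some y = some x) := by simp [h]
      simp [pvCol, hne, h, pvRunHeads, ih y]

theorem pvCol_none (ys : List String) : pvCol none ys = pvRunHeads ys := by
  cases ys with
  | nil => simp [pvCol, pvRunHeads]
  | cons x t => simp [pvCol, pvRunHeads, pvCol_some]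

-- ===== VERDICT (by name: the statement is the Claim_ definition above) =====
theorem get_pos_pattern_spec : Claim_equal_get_pos_pattern := by
  intro tokens _ _
  unfold Spec_get_pos_pattern get_pos_pattern get_pos_pattern_alt
  rw [pvFold_col]
  simp only [List.nil_append, List.getLast?_nil]
  rw [pvCol_none]
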